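-- pv_equiv track=rewrite | github.com/devisskz/Python | 2D Lists/ps7pr2.py | inner_grid
-- ===== SOURCE A (Python) =====
-- def create_grid(height, width):
--     """ creates and returns a 2-D list of 0s with the specified dimensions.
--         inputs: height and width are non-negative integers
--     """
--     grid = []
--
--     for r in range(height):
--         row = [0] * width     # a row containing width 0s
--         grid += [row]
--
--     return grid
--
-- def inner_grid(height,width,digit):
--     """creates and returns a 2d list where inner cells have a value of digit"""
--
--     grid = create_grid(height,width) #creates grid
--
--     for r in range(height):
--         for c in range(width):
--             if r == 0 or r== height-1:  #if r is 0 (first) or height-1 (end)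
--                 grid[r][c] = 0          #assigns to 0
--             elif c == 0 or c == width-1: #if c is 0 (first) or width-1 (end)
--                 grid[r][c] = 0          #assigns it to 0
--             else:
--                 grid[r][c] = digit      #otherwise, assigned to digit
--
--     return grid
-- ===== SOURCE B (Python) =====
-- def inner_grid(height, width, digit):
--     """creates and returns a 2d list where inner cells have a value of digit"""
--     def row(r):
--         if 0 < r < height - 1 and width >= 2:
--             return [0] + [digit] * (width - 2) + [0]
--         return [0] * width
--     return [row(r) for r in range(height)]
-- ===== Notes on version B (the rewrite author's own statement) =====
-- stated objective: simpler
-- what changed: Builds each row directly by structural pattern ([0] + [digit]*(width-2) + [0] for interior rows, [0]*width for border rows) in a single pass over row indices, instead of allocating a zero grid and then overwriting every cell through a nested per-cell loop with four branch conditions.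
import Mathlib
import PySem

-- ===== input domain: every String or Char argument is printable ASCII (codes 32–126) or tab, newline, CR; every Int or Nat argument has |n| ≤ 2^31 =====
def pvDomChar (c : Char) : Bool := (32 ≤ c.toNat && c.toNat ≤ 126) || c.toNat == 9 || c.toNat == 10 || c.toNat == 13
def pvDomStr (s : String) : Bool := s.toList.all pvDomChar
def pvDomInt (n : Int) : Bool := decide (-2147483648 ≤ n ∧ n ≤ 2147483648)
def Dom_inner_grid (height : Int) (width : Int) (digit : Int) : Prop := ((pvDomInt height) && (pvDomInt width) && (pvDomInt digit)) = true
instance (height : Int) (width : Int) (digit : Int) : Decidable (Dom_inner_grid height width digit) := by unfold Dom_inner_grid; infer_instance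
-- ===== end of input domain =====

-- B builds each row directly by structural pattern in one pass over row indices,
-- instead of A's zero grid overwritten cell by cell through a nested loop (objective: simpler).

-- ===== PORT A =====
-- [0] * width: Python list repetition, a negative count gives [] (Int.toNat clamps likewise)
def create_grid (height : Int) (width : Int) : List (List Int) :=
  (PySem.List.pyRange 0 height 1).foldl
    (fun grid _ => grid ++ [List.replicate width.toNat (0 : Int)]) []

def inner_grid (height : Int) (width : Int) (digit : Int) : List (List Int) :=
  let grid := create_grid height width
  (PySem.List.pyRange 0 height 1).foldl (fun grid r =>
    (PySem.List.pyRange 0 width 1).foldl (fun grid c =>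
      -- grid[r][c] = v : r, c come from range so they are in-bounds nonnegative indices
      let v : Int := if r = 0 ∨ r = height - 1 then 0
        else if c = 0 ∨ c = width - 1 then 0 else digit
      grid.set r.toNat ((grid.getD r.toNat []).set c.toNat v)) grid) grid

-- ===== PORT B =====
def inner_row (height : Int) (width : Int) (digit : Int) (r : Int) : List Int :=
  if (0 < r ∧ r < height - 1) ∧ 2 ≤ width then
    [0] ++ List.replicate (width - 2).toNat digit ++ [0]
  else List.replicate width.toNat 0

def inner_grid_alt (height : Int) (width : Int) (digit : Int) : List (List Int) :=
  (PySem.List.pyRange 0 height 1).map (inner_row height width digit)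

-- ===== PRECONDITION & SPEC =====
def Spec_inner_grid (height : Int) (width : Int) (digit : Int) (out : List (List Int)) : Prop := out = inner_grid_alt height width digit
instance (height : Int) (width : Int) (digit : Int) (out : List (List Int)) : Decidable (Spec_inner_grid height width digit out) := by unfold Spec_inner_grid; infer_instance

-- ===== CLAIM (what is proved, stated in full; the proofs are below) =====
def Claim_equal_inner_grid : Prop := ∀ (height : Int) (width : Int) (digit : Int), Dom_inner_grid height width digit → Spec_inner_grid height width digit (inner_grid height width digit)

-- ===== LEMMAS AND PROOFS =====

-- appending one constant element per iteration is replicate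
theorem pv_foldl_append_replicate {α β : Type} (l : List β) (a : List α) (x : α) :
    l.foldl (fun g _ => g ++ [x]) a = a ++ List.replicate l.length x := by
  induction l generalizing a with
  | nil => simp
  | cons c l ih => simp [List.foldl_cons, ih, List.replicate_succ]

theorem pv_set_getD_self {α : Type} (l : List α) (k : Nat) (d : α) :
    l.set k (l.getD k d) = l := by
  by_cases hk : k < l.length
  · have : l.getD k d = l[k] := by
      simp [List.getD_eq_getElem?_getD, List.getElem?_eq_getElem hk]
    rw [this, List.set_getElem_self]
  · exact List.set_eq_of_length_le (by omega)

-- a fold that only repeatedly updates slot k localizes to a fold on that slot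
theorem pv_foldl_set_localize {α β : Type} (l : List β) (g : List α) (k : Nat) (d : α)
    (u : α → β → α) :
    l.foldl (fun g c => g.set k (u (g.getD k d) c)) g
      = g.set k (l.foldl u (g.getD k d)) := by
  induction l generalizing g with
  | nil => exact (pv_set_getD_self g k d).symm
  | cons c l ih =>
    rw [List.foldl_cons, ih, List.foldl_cons]
    by_cases hk : k < g.length
    · have h1 : (g.set k (u (g.getD k d) c)).getD k d = u (g.getD k d) c := by
        simp [List.getD_eq_getElem?_getD, hk]
      rw [h1, List.set_set]
    · have hg : ∀ y : α, g.set k y = g := fun y => List.set_eq_of_length_le (by omega)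
      have hd : g.getD k d = d := by
        rw [List.getD_eq_getElem?_getD, List.getElem?_eq_none (by omega : g.length ≤ k)]
        rfl
      rw [hg, hd, hg, hg]

-- updating slots pre.length, …, pre.length+k-1 of pre ++ replicate k x in order
theorem pv_foldl_set_range' {α : Type} (k : Nat) (pre : List α) (x d : α)
    (f : Nat → α → α) :
    (List.range' pre.length k).foldl (fun acc i => acc.set i (f i (acc.getD i d)))
        (pre ++ List.replicate k x)
      = pre ++ (List.range' pre.length k).map (fun i => f i x) := by
  induction k generalizing pre with
  | zero => simp
  | succ k ih =>
    rw [List.range'_succ, List.replicate_succ]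
    have hget : (pre ++ x :: List.replicate k x).getD pre.length d = x := by
      simp [List.getD_eq_getElem?_getD]
    have hset : (pre ++ x :: List.replicate k x).set pre.length (f pre.length x)
        = (pre ++ [f pre.length x]) ++ List.replicate k x := by
      rw [List.set_append_right _ _ (le_refl pre.length)]
      simp
    rw [List.foldl_cons, hget, hset]
    have h2 := ih (pre ++ [f pre.length x])
    simp only [List.length_append, List.length_cons, List.length_nil, Nat.zero_add] at h2
    rw [h2]
    simp

-- corollary for pre = [], stated over List.range
theorem pv_foldl_set_range {α : Type} (k : Nat) (x d : α) (f : Nat → α → α) :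
    (List.range k).foldl (fun acc i => acc.set i (f i (acc.getD i d)))
        (List.replicate k x)
      = (List.range k).map (fun i => f i x) := by
  have h := pv_foldl_set_range' k ([] : List α) x d f
  simpa [List.range_eq_range'] using h

-- the value A writes at row r, column c
def pv_v (height width digit r c : Int) : Int :=
  if r = 0 ∨ r = height - 1 then 0
  else if c = 0 ∨ c = width - 1 then 0 else digit

theorem pv_inner_grid_closed (height width digit : Int) :
    inner_grid height width digit
      = (List.range height.toNat).map (fun (k : Nat) =>
          (List.range width.toNat).map (fun (j : Nat) =>
            pv_v height width digit (k : Int) (j : Int))) := by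
  show (PySem.List.pyRange 0 height 1).foldl _ (create_grid height width) = _
  have hcg : create_grid height width
      = List.replicate height.toNat (List.replicate width.toNat (0 : Int)) := by
    unfold create_grid
    rw [pv_foldl_append_replicate]
    simp [PySem.List.length_pyRange_one]
  rw [hcg]
  rw [PySem.List.pyRange_one 0 height]
  rw [List.foldl_map]
  simp only [zero_add, Int.toNat_natCast, Int.sub_zero]
  -- localize the inner fold to the row it rewrites
  have hloc : ∀ (g : List (List Int)) (k : Nat),
      (PySem.List.pyRange 0 width 1).foldl (fun grid c =>
        grid.set k ((grid.getD k []).set c.toNat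
          (if (k : Int) = 0 ∨ (k : Int) = height - 1 then 0
           else if c = 0 ∨ c = width - 1 then 0 else digit))) g
      = g.set k ((PySem.List.pyRange 0 width 1).foldl
          (fun row c => row.set c.toNat
            (if (k : Int) = 0 ∨ (k : Int) = height - 1 then 0
             else if c = 0 ∨ c = width - 1 then 0 else digit)) (g.getD k [])) := by
    intro g k
    exact pv_foldl_set_localize (PySem.List.pyRange 0 width 1) g k []
      (fun row c => row.set c.toNat
        (if (k : Int) = 0 ∨ (k : Int) = height - 1 then 0
         else if c = 0 ∨ c = width - 1 then 0 else digit))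
  simp only [hloc]
  -- the inner fold on a fresh zero row has a closed form
  have hrow : ∀ (k : Nat),
      (PySem.List.pyRange 0 width 1).foldl
        (fun row c => row.set c.toNat
          (if (k : Int) = 0 ∨ (k : Int) = height - 1 then 0
           else if c = 0 ∨ c = width - 1 then 0 else digit))
        (List.replicate width.toNat (0 : Int))
      = (List.range width.toNat).map (fun (j : Nat) => pv_v height width digit (k : Int) (j : Int)) := by
    intro k
    rw [PySem.List.pyRange_one 0 width, List.foldl_map]
    simp only [zero_add, Int.toNat_natCast, Int.sub_zero]
    have h := pv_foldl_set_range width.toNat (0 : Int) 0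
      (fun j _ => if (k : Int) = 0 ∨ (k : Int) = height - 1 then 0
        else if (j : Int) = 0 ∨ (j : Int) = width - 1 then 0 else digit)
    rw [h]
    simp [pv_v]
  -- the outer fold in closed form
  have h2 := pv_foldl_set_range height.toNat (List.replicate width.toNat (0 : Int)) []
    (fun k row => (PySem.List.pyRange 0 width 1).foldl
      (fun row c => row.set c.toNat
        (if (k : Int) = 0 ∨ (k : Int) = height - 1 then 0
         else if c = 0 ∨ c = width - 1 then 0 else digit)) row)
  rw [h2]
  exact List.map_congr_left (fun k _ => hrow k)

theorem pv_row_eq (height width digit : Int) (k : Nat) (hk : (k : Int) < height) :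
    (List.range width.toNat).map (fun (j : Nat) => pv_v height width digit (k : Int) (j : Int))
      = inner_row height width digit (k : Int) := by
  by_cases hb : (k : Int) = 0 ∨ (k : Int) = height - 1
  · have h1 : ∀ j ∈ List.range width.toNat,
        pv_v height width digit (k : Int) (j : Int) = 0 := by
      intro j _; unfold pv_v; rw [if_pos hb]
    rw [List.map_congr_left h1, List.map_const']
    rw [inner_row, if_neg (by omega)]
    simp
  · have hk0 : 0 < (k : Int) ∧ (k : Int) < height - 1 := by omega
    by_cases hw : 2 ≤ width
    · set n := width.toNat with hn
      have hn2 : 2 ≤ n := by omega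
      have hsplit : List.range n = [0] ++ List.range' 1 (n - 2) ++ [n - 1] := by
        rw [List.range_eq_range']
        have e1 : List.range' 0 1 ++ List.range' 1 (n - 1) = List.range' 0 n := by
          have := List.range'_append (s := 0) (m := 1) (n := n - 1) (step := 1)
          simpa [Nat.add_sub_cancel' (by omega : 1 ≤ n)] using this
        have e2 : List.range' 1 (n - 2) ++ List.range' (n - 1) 1 = List.range' 1 (n - 1) := by
          have := List.range'_append (s := 1) (m := n - 2) (n := 1) (step := 1)
          have harr : 1 + 1 * (n - 2) = n - 1 := by omega
          have harr2 : n - 2 + 1 = n - 1 := by omega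
          rw [harr, harr2] at this
          exact this
        rw [← e1, ← e2]
        simp [List.range'_one]
      rw [hsplit]
      rw [inner_row, if_pos ⟨hk0, hw⟩]
      simp only [List.map_append, List.map_cons, List.map_nil]
      have hmid : (List.range' 1 (n - 2)).map
          (fun (j : Nat) => pv_v height width digit (k : Int) (j : Int))
          = List.replicate (width - 2).toNat digit := by
        have h1 : ∀ j ∈ List.range' 1 (n - 2),
            pv_v height width digit (k : Int) (j : Int) = digit := by
          intro j hj
          rw [List.mem_range'] at hj
          obtain ⟨i, hi, hji⟩ := hj
          have hj1 : 1 ≤ j ∧ j ≤ n - 2 := by omega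
          unfold pv_v
          rw [if_neg hb, if_neg (by omega)]
        rw [List.map_congr_left h1, List.map_const', List.length_range']
        congr 1
        omega
      rw [hmid]
      have h0 : pv_v height width digit (k : Int) ((0 : Nat) : Int) = 0 := by
        unfold pv_v
        rw [if_neg hb]
        simp
      have hl : pv_v height width digit (k : Int) ((n - 1 : Nat) : Int) = 0 := by
        have : ((n - 1 : Nat) : Int) = width - 1 := by omega
        unfold pv_v
        rw [if_neg hb, if_pos (Or.inr this)]
      rw [h0, hl]
    · rw [inner_row, if_neg (by tauto)]
      have hn : width.toNat = 0 ∨ width.toNat = 1 := by omega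
      rcases hn with h | h <;> rw [h] <;> simp [pv_v, hb]

-- ===== VERDICT (by name: the statement is the Claim_ definition above) =====
theorem inner_grid_spec : Claim_equal_inner_grid := by
  intro height width digit _
  unfold Spec_inner_grid inner_grid_alt
  rw [pv_inner_grid_closed, PySem.List.pyRange_one 0 height, List.map_map]
  simp only [Int.sub_zero]
  apply List.map_congr_left
  intro k hk
  rw [List.mem_range] at hk
  have hk' : (k : Int) < height := by omega
  simp only [Function.comp_apply, zero_add]
  exact pv_row_eq height width digit k hk'
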